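-- pv_equiv track=rewrite | github.com/blackjins/python_practice | H.W(eleven-2_weak)/number_seven.py | zip_strings
-- ===== SOURCE A (Python) =====
-- def zip_strings(str1, str2, str3):
--     result = ""
--     if str1 > str2:
--         for pair in zip(str1, str2):
--             result = result +  "".join(pair)
--         if len(str1) < len(str2):
--             result = result + str2[len(str1):len(str2)]
--         else:
--             result = result + str1[len(str2):len(str1)]
--     elif str1 == str2:
--         for pair in zip(str1, str2):
--             result = result +  "".join(pair)
--         if len(str1) < len(str2):
--             result = result + str2[len(str1):len(str2)]
--         else:
--             result = result + str1[len(str2):len(str1)]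
--     else:
--         for pair in zip(str2, str1):
--             result = result +  "".join(pair)
--         if len(str1) < len(str2):
--             result = result + str2[len(str1):len(str2)]
--         else:
--             result = result + str1[len(str2):len(str1)]
--     # if result == str3:
--         # return True
--     return result
-- ===== SOURCE B (Python) =====
-- def zip_strings(str1, str2, str3):
--     a, b = (str1, str2) if str1 >= str2 else (str2, str1)
--     return ''.join(
--         (a[i] if i < len(a) else '') + (b[i] if i < len(b) else '')
--         for i in range(max(len(a), len(b))))
-- ===== Notes on version B (the rewrite author's own statement) =====
-- stated objective: simpler
-- what changed: B picks the interleave order once (str1 >= str2) and does a single zip_longest-style pass over range(max(len(a), len(b))), where each index contributes its one or two characters, so A's three duplicated branches and the separate tail-slice append disappear.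
import Mathlib
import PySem

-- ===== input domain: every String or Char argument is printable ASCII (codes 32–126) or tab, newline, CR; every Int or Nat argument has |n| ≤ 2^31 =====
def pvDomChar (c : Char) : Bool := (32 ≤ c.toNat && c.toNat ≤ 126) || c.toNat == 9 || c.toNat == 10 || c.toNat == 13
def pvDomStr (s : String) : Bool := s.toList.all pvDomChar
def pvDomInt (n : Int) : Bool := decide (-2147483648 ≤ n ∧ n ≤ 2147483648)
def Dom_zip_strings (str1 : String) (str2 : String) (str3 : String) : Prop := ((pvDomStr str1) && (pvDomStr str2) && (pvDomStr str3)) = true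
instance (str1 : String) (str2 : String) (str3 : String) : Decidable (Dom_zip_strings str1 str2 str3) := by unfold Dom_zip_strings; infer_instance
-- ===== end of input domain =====

-- B replaces A's three duplicated zip-then-tail branches by one order pick plus a single
-- zip_longest-style full-length pass (objective: simpler; no speed claim).

-- ===== PORT A =====
-- literal port of A; the Python string is built as a List Char and packed with String.ofList at the end
def zip_strings (str1 : String) (str2 : String) (str3 : String) : String :=
  let l1 := str1.toList
  let l2 := str2.toList
  let result : List Char := []
  if str2 < str1 then
    let result := (l1.zip l2).foldl (fun r p => r ++ [p.1, p.2]) result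
    let result :=
      if l1.length < l2.length then
        result ++ PySem.List.slice l2 (some (l1.length : Int)) (some (l2.length : Int))
      else
        result ++ PySem.List.slice l1 (some (l2.length : Int)) (some (l1.length : Int))
    String.ofList result
  else if str1 = str2 then
    let result := (l1.zip l2).foldl (fun r p => r ++ [p.1, p.2]) result
    let result :=
      if l1.length < l2.length then
        result ++ PySem.List.slice l2 (some (l1.length : Int)) (some (l2.length : Int))
      else
        result ++ PySem.List.slice l1 (some (l2.length : Int)) (some (l1.length : Int))
    String.ofList result
  else
    let result := (l2.zip l1).foldl (fun r p => r ++ [p.1, p.2]) result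
    let result :=
      if l1.length < l2.length then
        result ++ PySem.List.slice l2 (some (l1.length : Int)) (some (l2.length : Int))
      else
        result ++ PySem.List.slice l1 (some (l2.length : Int)) (some (l1.length : Int))
    String.ofList result

-- ===== PORT B =====
-- literal port of Source B: pick the order, then one pass over range(max(len a, len b)),
-- each index contributing its (possibly empty) pair of characters (''.join over the generator = flatMap)
def zip_strings_alt (str1 : String) (str2 : String) (str3 : String) : String :=
  let a := if str2 ≤ str1 then str1 else str2
  let b := if str2 ≤ str1 then str2 else str1
  let la := a.toList
  let lb := b.toList
  String.ofList ((List.range (max la.length lb.length)).flatMap (fun i =>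
    (if h : i < la.length then [la[i]] else []) ++ (if h : i < lb.length then [lb[i]] else [])))

-- ===== PRECONDITION & SPEC =====
def Spec_zip_strings (str1 : String) (str2 : String) (str3 : String) (out : String) : Prop := out = zip_strings_alt str1 str2 str3
instance (str1 : String) (str2 : String) (str3 : String) (out : String) : Decidable (Spec_zip_strings str1 str2 str3 out) := by unfold Spec_zip_strings; infer_instance

-- ===== CLAIM (what is proved, stated in full; the proofs are below) =====
def Claim_equal_zip_strings : Prop := ∀ (str1 : String) (str2 : String) (str3 : String), Dom_zip_strings str1 str2 str3 → Spec_zip_strings str1 str2 str3 (zip_strings str1 str2 str3)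

-- ===== LEMMAS AND PROOFS =====

-- B's per-index pair contribution, phrased with getElem? (equal to the port's dite form)
def pvPair (x y : List Char) (i : Nat) : List Char :=
  (x[i]?).toList ++ (y[i]?).toList

theorem pvPair_eq_dite (x y : List Char) :
    (fun i => (if h : i < x.length then [x[i]] else []) ++ (if h : i < y.length then [y[i]] else []))
      = pvPair x y := by
  funext i
  by_cases hx : i < x.length <;> by_cases hy : i < y.length <;>
    simp [pvPair, hx, hy, List.getElem?_eq_getElem, List.getElem?_eq_none]

theorem pvFoldl_eq_flatMap (ps : List (Char × Char)) (init : List Char) :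
    ps.foldl (fun r p => r ++ [p.1, p.2]) init = init ++ ps.flatMap (fun p => [p.1, p.2]) := by
  induction ps generalizing init with
  | nil => simp
  | cons p ps ih => simp [List.foldl, ih]

theorem pvRange_flatMap_single (y : List Char) :
    (List.range y.length).flatMap (fun i => (y[i]?).toList) = y := by
  induction y with
  | nil => simp
  | cons b ys ih =>
    rw [List.length_cons, List.range_succ_eq_map, List.flatMap_cons, List.flatMap_map]
    simpa using ih

-- main lemma: B's single pass equals A's zip-interleave plus the longer tail
theorem pvMain (x y : List Char) :
    (List.range (max x.length y.length)).flatMap (pvPair x y)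
      = (x.zip y).flatMap (fun p => [p.1, p.2])
        ++ (if x.length < y.length then y.drop x.length else x.drop y.length) := by
  induction x generalizing y with
  | nil =>
    cases y with
    | nil => simp [pvPair]
    | cons b ys =>
      simp only [List.length_nil, List.length_cons, Nat.max_eq_right (Nat.zero_le _),
        List.zip_nil_left, List.flatMap_nil, List.nil_append]
      rw [if_pos (by simp)]
      simp only [List.drop_zero]
      rw [show pvPair [] (b :: ys) = (fun i => ((b :: ys)[i]?).toList) from
          funext fun i => by simp [pvPair]]
      exact pvRange_flatMap_single (b :: ys)
  | cons a xs ih =>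
    cases y with
    | nil =>
      simp only [List.length_cons, List.length_nil, Nat.max_eq_left (Nat.zero_le _),
        List.zip_nil_right, List.flatMap_nil, List.nil_append]
      rw [if_neg (by omega)]
      simp only [List.drop_zero]
      rw [show pvPair (a :: xs) [] = (fun i => ((a :: xs)[i]?).toList) from
          funext fun i => by simp [pvPair]]
      exact pvRange_flatMap_single (a :: xs)
    | cons b ys =>
      have hmax : max (a :: xs).length (b :: ys).length = max xs.length ys.length + 1 := by
        simp [Nat.succ_max_succ]
      rw [hmax, List.range_succ_eq_map, List.flatMap_cons, List.flatMap_map]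
      rw [show (fun i => pvPair (a :: xs) (b :: ys) i.succ) = pvPair xs ys from
          funext fun i => by simp [pvPair], ih]
      have hp0 : pvPair (a :: xs) (b :: ys) 0 = [a, b] := by simp [pvPair]
      rw [hp0]
      simp only [List.zip_cons_cons, List.flatMap_cons, List.length_cons,
        Nat.add_lt_add_iff_right, List.drop_succ_cons]
      simp

-- the tail expression is symmetric in x and y (the only asymmetric case, equal lengths, gives [] both ways)
theorem pvTail_comm (x y : List Char) :
    (if y.length < x.length then x.drop y.length else y.drop x.length)
      = (if x.length < y.length then y.drop x.length else x.drop y.length) := by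
  rcases Nat.lt_trichotomy x.length y.length with h | h | h
  · rw [if_neg (by omega), if_pos h]
  · rw [if_neg (by omega), if_neg (by omega), h, List.drop_length, ← h, List.drop_length]
  · rw [if_pos h, if_neg (by omega)]

-- ===== VERDICT (by name: the statement is the Claim_ definition above) =====
theorem zip_strings_spec : Claim_equal_zip_strings := by
  intro str1 str2 str3 _
  unfold Spec_zip_strings
  simp only [zip_strings, zip_strings_alt, PySem.List.slice_natCast, pvPair_eq_dite,
    pvFoldl_eq_flatMap, List.nil_append]
  rcases lt_trichotomy str2 str1 with hlt | heq | hgt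
  · rw [if_pos hlt, if_pos (le_of_lt hlt), if_pos (le_of_lt hlt)]
    rw [pvMain str1.toList str2.toList]
    congr 1
    split_ifs
    · rw [List.take_of_length_le (by simp)]
    · rw [List.take_of_length_le (by simp)]
  · subst heq
    rw [if_neg (lt_irrefl str2), if_pos rfl, if_pos (le_refl str2)]
    rw [pvMain str2.toList str2.toList]
    congr 1
    rw [if_neg (lt_irrefl _), if_neg (lt_irrefl _)]
    rw [List.take_of_length_le (by simp)]
  · rw [if_neg (by exact fun h => absurd h (not_lt.mpr (le_of_lt hgt))),
        if_neg (fun h => absurd h (ne_of_lt hgt)),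
        if_neg (not_le.mpr hgt), if_neg (not_le.mpr hgt)]
    rw [pvMain str2.toList str1.toList, ← pvTail_comm str2.toList str1.toList]
    congr 1
    split_ifs
    · rw [List.take_of_length_le (by simp)]
    · rw [List.take_of_length_le (by simp)]
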